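-- pv_equiv track=rewrite | github.com/L2301/sgk | Components/method/count_matrix.py | index_to_ngram
-- ===== SOURCE A (Python) =====
-- VOCAB_SIZE = 50257
--
-- def index_to_ngram(index: int, n: int, vocab_size: int = VOCAB_SIZE) -> tuple[int, ...]:
--     """
--     Convert a flat row index back to an n-gram tuple.
--
--     Args:
--         index: Flat index
--         n: Size of n-gram
--         vocab_size: Size of vocabulary
--
--     Returns:
--         Tuple of token IDs
--     """
--     ngram = []
--     for i in range(n):
--         divisor = vocab_size ** (n - 1 - i)
--         token = index // divisor
--         index = index % divisor
--         ngram.append(token)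
--     return tuple(ngram)
-- ===== SOURCE B (Python) =====
-- VOCAB_SIZE = 50257
--
-- def index_to_ngram(index: int, n: int, vocab_size: int = VOCAB_SIZE) -> tuple[int, ...]:
--     """Peel digits least-significant first with divmod, then reverse.
--
--     One O(len(index))-size divmod per digit instead of recomputing a full
--     power of vocab_size at every step.
--     """
--     if n <= 0:
--         return ()
--     digits = []
--     for _ in range(n - 1):
--         index, r = divmod(index, vocab_size)
--         digits.append(r)
--     digits.append(index)
--     return tuple(reversed(digits))
-- ===== Notes on version B (the rewrite author's own statement) =====
-- stated objective: faster
-- what changed: A recomputes vocab_size**(n-1-i) from scratch each iteration and extracts digits most-significant first; B peels digits least-significant first with one divmod per digit and reverses, never forming any power.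
-- outside the precondition, e.g. on index_to_ngram(7, 3, -2): A returns (1, -2, -1), B returns (2, 0, -1); on index_to_ngram(5, 2, 0): A raises ZeroDivisionError, B raises ZeroDivisionError
import Mathlib
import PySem

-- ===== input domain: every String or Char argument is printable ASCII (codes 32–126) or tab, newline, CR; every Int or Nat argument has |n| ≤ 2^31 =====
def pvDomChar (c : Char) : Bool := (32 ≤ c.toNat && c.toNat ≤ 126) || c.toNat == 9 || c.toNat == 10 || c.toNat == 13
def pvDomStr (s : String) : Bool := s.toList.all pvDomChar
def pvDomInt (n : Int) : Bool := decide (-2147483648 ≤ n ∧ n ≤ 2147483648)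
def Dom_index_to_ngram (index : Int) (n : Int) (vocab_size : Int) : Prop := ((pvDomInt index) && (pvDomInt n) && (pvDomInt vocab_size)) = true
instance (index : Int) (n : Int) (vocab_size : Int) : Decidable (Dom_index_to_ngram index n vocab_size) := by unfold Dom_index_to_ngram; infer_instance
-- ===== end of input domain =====

-- B replaces A's per-digit recomputation of a full power of vocab_size (most-significant
-- digit first) by one divmod per digit, least-significant first, reversing at the end.

-- ===== PORT A =====
-- Literal port of A: for i in range(n), divisor = vocab_size ** (n-1-i) (exponent is
-- nonnegative for every i in range(n), so .toNat is exact), token = index // divisor,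
-- index = index % divisor, append token.
def index_to_ngram (index : Int) (n : Int) (vocab_size : Int) : List Int :=
  ((PySem.List.pyRange 0 n 1).foldl
    (fun st i =>
      (st.1 ++ [PySem.Int.floordiv st.2 (vocab_size ^ (n - 1 - i).toNat)],
       PySem.Int.mod st.2 (vocab_size ^ (n - 1 - i).toNat)))
    ([], index)).1

-- ===== PORT B =====
-- Literal port of Source B: n-1 divmod steps collecting remainders (prepending builds the
-- reversed list directly, as Source B's append + reversed does), then the final quotient.
def altLoop (vocab_size : Int) : Nat → Int → List Int → List Int
  | 0, idx, digits => idx :: digits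
  | k+1, idx, digits =>
      altLoop vocab_size k (PySem.Int.floordiv idx vocab_size)
        (PySem.Int.mod idx vocab_size :: digits)

def index_to_ngram_alt (index : Int) (n : Int) (vocab_size : Int) : List Int :=
  if n ≤ 0 then [] else altLoop vocab_size (n - 1).toNat index []

-- ===== PRECONDITION & SPEC =====
-- Pre_ excludes vocab_size = 0 with n ≥ 2 (A raises ZeroDivisionError there, and B does
-- too) and vocab_size < 0 with n ≥ 3, where a negative radix makes A's power-based and
-- B's divmod-based digit decompositions two equally accidental values (they often, but
-- not always, coincide); a vocabulary size is positive in every real use.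
def Pre_index_to_ngram (index : Int) (n : Int) (vocab_size : Int) : Prop :=
  0 < vocab_size ∨ n ≤ 1 ∨ (n = 2 ∧ vocab_size ≠ 0)
instance (index : Int) (n : Int) (vocab_size : Int) : Decidable (Pre_index_to_ngram index n vocab_size) := by unfold Pre_index_to_ngram; infer_instance

def pvWitness_index_to_ngram : Int × Int × Int := (12345, 3, 7)

def Spec_index_to_ngram (index : Int) (n : Int) (vocab_size : Int) (out : List Int) : Prop := out = index_to_ngram_alt index n vocab_size
instance (index : Int) (n : Int) (vocab_size : Int) (out : List Int) : Decidable (Spec_index_to_ngram index n vocab_size out) := by unfold Spec_index_to_ngram; infer_instance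

-- ===== CLAIM (what is proved, stated in full; the proofs are below) =====
def Claim_equal_index_to_ngram : Prop := ∀ (index : Int) (n : Int) (vocab_size : Int), Dom_index_to_ngram index n vocab_size → Pre_index_to_ngram index n vocab_size → Spec_index_to_ngram index n vocab_size (index_to_ngram index n vocab_size)

-- ===== LEMMAS AND PROOFS =====

theorem pys_floordiv_one (x : Int) : PySem.Int.floordiv x 1 = x := by
  rw [PySem.Int.floordiv_eq_ediv_of_pos one_pos]; exact Int.ediv_one x

-- reference big-endian digit list: m digits of x in radix v, most significant (raw) first
def gDigits (v : Int) : Nat → Int → List Int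
  | 0, _ => []
  | (k+1), x => PySem.Int.floordiv x (v ^ k) :: gDigits v k (PySem.Int.mod x (v ^ k))

theorem pys_comp {v : Int} (hv : 0 < v) (x : Int) (k : Nat) :
    PySem.Int.floordiv (PySem.Int.floordiv x v) (v ^ k) = PySem.Int.floordiv x (v ^ (k+1)) := by
  rw [PySem.Int.floordiv_eq_ediv_of_pos hv, PySem.Int.floordiv_eq_ediv_of_pos (pow_pos hv k),
      PySem.Int.floordiv_eq_ediv_of_pos (pow_pos hv (k+1)),
      Int.ediv_ediv_of_nonneg (le_of_lt hv), ← pow_succ']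

theorem pys_mod_mod {v : Int} (hv : 0 < v) (x : Int) (k : Nat) :
    PySem.Int.mod (PySem.Int.mod x (v ^ (k+1))) v = PySem.Int.mod x v := by
  rw [PySem.Int.mod_eq_emod_of_pos hv, PySem.Int.mod_eq_emod_of_pos (pow_pos hv (k+1)),
      PySem.Int.mod_eq_emod_of_pos hv]
  exact Int.emod_emod_of_dvd x (dvd_pow_self v (Nat.succ_ne_zero k))

theorem pys_mod_div {v : Int} (hv : 0 < v) (x : Int) (k : Nat) :
    PySem.Int.floordiv (PySem.Int.mod x (v ^ (k+1))) v
      = PySem.Int.mod (PySem.Int.floordiv x v) (v ^ k) := by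
  rw [PySem.Int.floordiv_eq_ediv_of_pos hv, PySem.Int.mod_eq_emod_of_pos (pow_pos hv (k+1)),
      PySem.Int.floordiv_eq_ediv_of_pos hv, PySem.Int.mod_eq_emod_of_pos (pow_pos hv k)]
  have hcomp : x / v / v ^ k = x / v ^ (k+1) := by
    rw [Int.ediv_ediv_of_nonneg (le_of_lt hv), ← pow_succ']
  have h1 : x % v ^ (k+1) = x + (-(x / v ^ (k+1)) * v ^ k) * v := by
    rw [Int.emod_def]; ring
  rw [h1, Int.add_mul_ediv_right _ _ (ne_of_gt hv), ← hcomp, Int.emod_def]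
  ring

theorem gDigits_snoc {v : Int} (hv : 0 < v) :
    ∀ (k : Nat) (x : Int), gDigits v (k+2) x
      = gDigits v (k+1) (PySem.Int.floordiv x v) ++ [PySem.Int.mod x v] := by
  intro k
  induction k with
  | zero =>
      intro x
      simp [gDigits, pow_one, pow_zero]
  | succ k ih =>
      intro x
      show PySem.Int.floordiv x (v ^ (k+2)) :: gDigits v (k+2) (PySem.Int.mod x (v ^ (k+2)))
        = PySem.Int.floordiv (PySem.Int.floordiv x v) (v ^ (k+1))
            :: gDigits v (k+1) (PySem.Int.mod (PySem.Int.floordiv x v) (v ^ (k+1))) ++ [PySem.Int.mod x v]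
      rw [ih (PySem.Int.mod x (v ^ (k+2))), pys_comp hv, pys_mod_div hv, pys_mod_mod hv]
      simp

theorem altLoop_eq_gDigits {v : Int} (hv : 0 < v) :
    ∀ (k : Nat) (x : Int) (d : List Int), altLoop v k x d = gDigits v (k+1) x ++ d := by
  intro k
  induction k with
  | zero =>
      intro x d
      simp [altLoop, gDigits, pow_zero]
  | succ k ih =>
      intro x d
      rw [show altLoop v (k+1) x d
            = altLoop v k (PySem.Int.floordiv x v) (PySem.Int.mod x v :: d) from rfl,
          ih, gDigits_snoc hv]
      simp

theorem fold_eq_gDigits (v n : Int) :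
    ∀ (m : Nat) (j x : Int) (l : List Int), (n - j).toNat = m →
      ((PySem.List.pyRange j n 1).foldl
        (fun st i =>
          (st.1 ++ [PySem.Int.floordiv st.2 (v ^ (n - 1 - i).toNat)],
           PySem.Int.mod st.2 (v ^ (n - 1 - i).toNat)))
        (l, x)).1 = l ++ gDigits v m x := by
  intro m
  induction m with
  | zero =>
      intro j x l hm
      rw [PySem.List.pyRange_one_eq_nil (by omega)]
      simp [gDigits]
  | succ m ih =>
      intro j x l hm
      rw [PySem.List.pyRange_one_cons (show j < n by omega)]
      have hexp : (n - 1 - j).toNat = m := by omega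
      simp only [List.foldl_cons, hexp]
      rw [ih (j+1) (PySem.Int.mod x (v ^ m)) (l ++ [PySem.Int.floordiv x (v ^ m)]) (by omega)]
      simp [gDigits]

-- ===== VERDICT (by name: the statement is the Claim_ definition above) =====
theorem index_to_ngram_spec : Claim_equal_index_to_ngram := by
  intro index n v _ hpre
  unfold Spec_index_to_ngram
  by_cases hn0 : n ≤ 0
  · rw [index_to_ngram, index_to_ngram_alt, PySem.List.pyRange_one_eq_nil hn0, if_pos hn0]
    rfl
  · by_cases hv : 0 < v
    · rw [index_to_ngram, index_to_ngram_alt, if_neg hn0,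
          fold_eq_gDigits v n n.toNat 0 index [] (by omega),
          altLoop_eq_gDigits hv (n-1).toNat index [],
          show (n-1).toNat + 1 = n.toNat by omega]
      simp
    · -- v ≤ 0: Pre_ leaves only n = 1 or (n = 2 ∧ v ≠ 0); both sides compute directly
      have hn : n = 1 ∨ n = 2 := by
        rcases hpre with h | h | h
        · exact absurd h hv
        · left; omega
        · right; exact h.1
      rcases hn with h1 | h2
      · subst h1
        rw [index_to_ngram, index_to_ngram_alt,
            PySem.List.pyRange_one_cons (show (0:Int) < 1 by norm_num),
            PySem.List.pyRange_one_eq_nil (show (1:Int) ≤ 0 + 1 by norm_num)]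
        norm_num [altLoop, pys_floordiv_one]
      · subst h2
        rw [index_to_ngram, index_to_ngram_alt,
            PySem.List.pyRange_one_cons (show (0:Int) < 2 by norm_num),
            PySem.List.pyRange_one_cons (show (0:Int) + 1 < 2 by norm_num),
            PySem.List.pyRange_one_eq_nil (show (2:Int) ≤ 0 + 1 + 1 by norm_num)]
        norm_num [altLoop, pys_floordiv_one]
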